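-- pv_equiv track=rewrite | github.com/RoseQSun/InterpretableObjectiveEvaluation | scripts/txt_to_abc.py | parse_lines_to_pieces
-- ===== SOURCE A (Python) =====
-- def parse_lines_to_pieces(lines):
--     def is_start_line(line): return line.startswith('M:')
--     def is_line_in_piece(line): return not is_start_line(line)
--     # def proc_line(line): return line.split(' '*3)[0]
--     pieces = []
--     piece = []
--     in_piece = False
--     for line in lines:
--         if not in_piece:  # search for a start line
--             if is_start_line(line):
--                 in_piece = True
--                 piece.append(line)
--         else:  # check if the current line is in piece
--             # NOTE: the last piece is not the last line, so
--             # it should already be appended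
--             if is_line_in_piece(line):
--                 piece.append(line)
--             else:
--                 pieces.append(piece)
--                 piece = [line]
--                 in_piece = True
--     if len(piece) > 2:
--         pieces.append(piece)
--     return pieces
-- ===== SOURCE B (Python) =====
-- def parse_lines_to_pieces(lines):
--     lines = list(lines)
--     n = len(lines)
--     i = 0
--     while i < n and not lines[i].startswith('M:'):
--         i += 1
--     pieces = []
--     while i < n:
--         j = i + 1
--         while j < n and not lines[j].startswith('M:'):
--             j += 1
--         piece = lines[i:j]
--         if j < n or len(piece) > 2:
--             pieces.append(piece)
--         i = j
--     return pieces
-- ===== Notes on version B (the rewrite author's own statement) =====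
-- stated objective: alternative
-- what changed: Replaces A's one-line-at-a-time flag state machine (in_piece flag, incremental piece.append) by an index-scanning loop that locates each 'M:' start line and emits whole slices lines[i:j] between consecutive starts, with the same final len>2 filter.
import Mathlib
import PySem

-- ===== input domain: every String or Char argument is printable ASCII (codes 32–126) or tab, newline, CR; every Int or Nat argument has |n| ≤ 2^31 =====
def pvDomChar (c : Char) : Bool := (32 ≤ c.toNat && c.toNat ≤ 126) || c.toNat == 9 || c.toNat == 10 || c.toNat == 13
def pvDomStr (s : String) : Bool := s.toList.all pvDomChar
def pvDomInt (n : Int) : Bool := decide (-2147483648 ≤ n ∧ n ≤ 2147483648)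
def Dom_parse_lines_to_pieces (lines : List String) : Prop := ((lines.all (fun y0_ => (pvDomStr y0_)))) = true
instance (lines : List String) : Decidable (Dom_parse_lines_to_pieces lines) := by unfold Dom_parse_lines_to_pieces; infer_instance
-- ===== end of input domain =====

-- B replaces A's one-line-at-a-time flag state machine by an index scan that finds each
-- start line and emits slices; same values on all inputs (objective: alternative).

-- ===== PORT A =====
-- the for-loop of A as structural recursion over the lines with A's state (pieces, piece, in_piece)
def pvLoopA (ls : List String) (pieces : List (List String)) (piece : List String)
    (in_piece : Bool) : List (List String) × List String :=
  match ls with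
  | [] => (pieces, piece)
  | line :: rest =>
    if !in_piece then
      if PySem.Str.startswith line "M:" then pvLoopA rest pieces (piece ++ [line]) true
      else pvLoopA rest pieces piece in_piece
    else
      if !(PySem.Str.startswith line "M:") then pvLoopA rest pieces (piece ++ [line]) in_piece
      else pvLoopA rest (pieces ++ [piece]) [line] true

def parse_lines_to_pieces (lines : List String) : List (List String) :=
  let st := pvLoopA lines [] [] false
  if st.2.length > 2 then st.1 ++ [st.2] else st.1

-- ===== PORT B =====
-- the inner 'while j < n and not startswith' scan; indices are Nats (never negative in B)
def pvScan (lines : List String) (j : Nat) : Nat :=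
  if h : j < lines.length then
    if !(PySem.Str.startswith lines[j] "M:") then pvScan lines (j + 1) else j
  else j
termination_by lines.length - j

-- needed by pvOuter's termination argument
theorem pvScan_ge (lines : List String) (j : Nat) : j ≤ pvScan lines j := by
  fun_induction pvScan lines j <;> omega

-- the outer while loop; lines[i:j] with 0 ≤ i ≤ j is exactly (lines.drop i).take (j - i)
def pvOuter (lines : List String) (i : Nat) (pieces : List (List String)) :
    List (List String) :=
  if _h : i < lines.length then
    let j := pvScan lines (i + 1)
    let piece := (lines.drop i).take (j - i)
    let pieces' := if j < lines.length ∨ piece.length > 2 then pieces ++ [piece] else pieces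
    pvOuter lines j pieces'
  else pieces
termination_by lines.length - i
decreasing_by
  have : i + 1 ≤ pvScan lines (i + 1) := pvScan_ge lines (i + 1)
  omega

def parse_lines_to_pieces_alt (lines : List String) : List (List String) :=
  pvOuter lines (pvScan lines 0) []

-- ===== PRECONDITION & SPEC =====
def Spec_parse_lines_to_pieces (lines : List String) (out : List (List String)) : Prop := out = parse_lines_to_pieces_alt lines
instance (lines : List String) (out : List (List String)) : Decidable (Spec_parse_lines_to_pieces lines out) := by unfold Spec_parse_lines_to_pieces; infer_instance

-- ===== CLAIM (what is proved, stated in full; the proofs are below) =====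
def Claim_equal_parse_lines_to_pieces : Prop := ∀ (lines : List String), Dom_parse_lines_to_pieces lines → Spec_parse_lines_to_pieces lines (parse_lines_to_pieces lines)

-- ===== LEMMAS AND PROOFS =====
def pvNotStart (l : String) : Bool := !(PySem.Str.startswith l "M:")

-- A's loop, restated as two mutual-style spec functions: build the current piece / skip the prefix
def pvBuildS (piece : List String) : List String → List (List String)
  | [] => if piece.length > 2 then [piece] else []
  | l :: ls => if pvNotStart l then pvBuildS (piece ++ [l]) ls else piece :: pvBuildS [l] ls

def pvSkipS : List String → List (List String)
  | [] => []
  | l :: ls => if pvNotStart l then pvSkipS ls else pvBuildS [l] ls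

-- pieces produced from a suffix whose head is a start line, expressed with span (takeWhile/dropWhile)
def pvBspec : List String → List (List String)
  | [] => []
  | l :: rest =>
    let piece := l :: rest.takeWhile pvNotStart
    let rest' := rest.dropWhile pvNotStart
    if rest'.isEmpty then (if piece.length > 2 then [piece] else []) else piece :: pvBspec rest'
termination_by ls => ls.length
decreasing_by
  have := List.length_dropWhile_le pvNotStart rest
  simp only [List.length_cons]
  omega

def pvFinish (st : List (List String) × List String) : List (List String) :=
  if st.2.length > 2 then st.1 ++ [st.2] else st.1

theorem pvLoopA_build (ls : List String) :
    ∀ (pieces : List (List String)) (piece : List String),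
      pvFinish (pvLoopA ls pieces piece true) = pieces ++ pvBuildS piece ls := by
  induction ls with
  | nil => intro pieces piece; simp [pvLoopA, pvBuildS, pvFinish]; split <;> simp
  | cons l ls ih =>
    intro pieces piece
    by_cases hs : PySem.Chars.startswith l.toList ['M', ':'] = true
    · simp [pvLoopA, pvBuildS, pvNotStart, hs, ih]
    · simp [pvLoopA, pvBuildS, pvNotStart, hs, ih]

theorem pvLoopA_skip (ls : List String) :
    ∀ (pieces : List (List String)),
      pvFinish (pvLoopA ls pieces [] false) = pieces ++ pvSkipS ls := by
  induction ls with
  | nil => intro pieces; simp [pvLoopA, pvSkipS, pvFinish]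
  | cons l ls ih =>
    intro pieces
    by_cases hs : PySem.Chars.startswith l.toList ['M', ':'] = true
    · simp [pvLoopA, pvSkipS, pvNotStart, hs, pvLoopA_build]
    · simp [pvLoopA, pvSkipS, pvNotStart, hs, ih]

theorem pvA_eq_skip (lines : List String) : parse_lines_to_pieces lines = pvSkipS lines := by
  have := pvLoopA_skip lines []
  simpa [pvFinish, parse_lines_to_pieces] using this

-- span characterisation of pvBuildS
theorem pvBuild_span (ls : List String) :
    ∀ piece, pvBuildS piece ls =
      (if (ls.dropWhile pvNotStart).isEmpty then
        (if (piece ++ ls.takeWhile pvNotStart).length > 2 then [piece ++ ls.takeWhile pvNotStart] else [])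
      else (piece ++ ls.takeWhile pvNotStart) :: pvBspec (ls.dropWhile pvNotStart)) := by
  induction ls with
  | nil => intro piece; simp [pvBuildS]
  | cons l ls ih =>
    intro piece
    by_cases hn : pvNotStart l
    · simp only [pvBuildS, hn, if_pos, List.takeWhile_cons_of_pos, List.dropWhile_cons_of_pos]
      rw [ih]
      simp
    · have hn' : pvNotStart l = false := by simpa using hn
      rw [List.takeWhile_cons_of_neg (by simp [hn']), List.dropWhile_cons_of_neg (by simp [hn'])]
      rw [show pvBuildS piece (l :: ls) = piece :: pvBuildS [l] ls by simp [pvBuildS, hn']]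
      rw [show (l :: ls).isEmpty = false from rfl]
      simp only [Bool.false_eq_true, if_false, List.append_nil]
      congr 1
      rw [ih [l]]
      rw [show pvBspec (l :: ls) = (if (List.dropWhile pvNotStart ls).isEmpty then
            (if (l :: List.takeWhile pvNotStart ls).length > 2 then [l :: List.takeWhile pvNotStart ls] else [])
          else (l :: List.takeWhile pvNotStart ls) :: pvBspec (List.dropWhile pvNotStart ls)) from by
        rw [pvBspec]]
      simp

theorem pvBuild_bspec (l : String) (ls : List String) :
    pvBuildS [l] ls = pvBspec (l :: ls) := by
  rw [pvBuild_span]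
  simp [pvBspec]

theorem pvSkip_bspec (ls : List String) : pvSkipS ls = pvBspec (ls.dropWhile pvNotStart) := by
  induction ls with
  | nil => simp [pvSkipS, pvBspec]
  | cons l ls ih =>
    by_cases hn : pvNotStart l
    · simp [pvSkipS, hn, List.dropWhile_cons_of_pos, ih]
    · simp [pvSkipS, hn, List.dropWhile_cons_of_neg, pvBuild_bspec]

-- take/drop by the length of a takeWhile
theorem pvTake_takeWhile {α : Type} (p : α → Bool) (l : List α) :
    l.take (l.takeWhile p).length = l.takeWhile p := by
  induction l with
  | nil => simp
  | cons a l ih =>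
    by_cases h : p a
    · simp [List.takeWhile_cons_of_pos, h, ih]
    · simp [List.takeWhile_cons_of_neg, h]

theorem pvDrop_takeWhile {α : Type} (p : α → Bool) (l : List α) :
    l.drop (l.takeWhile p).length = l.dropWhile p := by
  induction l with
  | nil => simp
  | cons a l ih =>
    by_cases h : p a
    · simp [List.takeWhile_cons_of_pos, h, List.dropWhile_cons_of_pos, ih]
    · simp [List.takeWhile_cons_of_neg, h, List.dropWhile_cons_of_neg]

theorem pvScan_spec (lines : List String) (j : Nat) :
    pvScan lines j = j + ((lines.drop j).takeWhile pvNotStart).length := by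
  fun_induction pvScan lines j with
  | case1 j h hns ih =>
    rw [ih, List.drop_eq_getElem_cons h,
      List.takeWhile_cons_of_pos (p := pvNotStart) (by simpa [pvNotStart] using hns)]
    simp only [List.length_cons]
    omega
  | case2 j h hns =>
    rw [List.drop_eq_getElem_cons h,
      List.takeWhile_cons_of_neg (p := pvNotStart) (by simpa [pvNotStart] using hns)]
    simp
  | case3 j h =>
    rw [List.drop_eq_nil_of_le (by omega)]
    simp

theorem pvScan_drop (lines : List String) (j : Nat) :
    lines.drop (pvScan lines j) = (lines.drop j).dropWhile pvNotStart := by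
  rw [pvScan_spec, ← List.drop_drop, pvDrop_takeWhile]

theorem pvScan_take (lines : List String) (j : Nat) :
    (lines.drop j).take (pvScan lines j - j) = (lines.drop j).takeWhile pvNotStart := by
  rw [pvScan_spec, Nat.add_sub_cancel_left, pvTake_takeWhile]

theorem pvOuter_spec (lines : List String) (i : Nat) (pieces : List (List String)) :
    pvOuter lines i pieces = pieces ++ pvBspec (lines.drop i) := by
  fun_induction pvOuter lines i pieces with
  | case1 i pieces h j piece pieces' ih =>
    have hj : i + 1 ≤ j := pvScan_ge lines (i + 1)
    have hdrop : lines.drop i = lines[i] :: lines.drop (i + 1) := List.drop_eq_getElem_cons h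
    have hpiece : piece = lines[i] :: (lines.drop (i + 1)).takeWhile pvNotStart := by
      show (lines.drop i).take (j - i) = _
      rw [hdrop, show j - i = (j - (i + 1)) + 1 by omega, List.take_succ_cons]
      rw [show j - (i + 1) = pvScan lines (i + 1) - (i + 1) from rfl, pvScan_take]
    have hrest : (lines.drop (i + 1)).dropWhile pvNotStart = lines.drop j :=
      (pvScan_drop lines (i + 1)).symm
    have hbspec : pvBspec (lines.drop i) =
        if (lines.drop j).isEmpty then (if piece.length > 2 then [piece] else [])
        else piece :: pvBspec (lines.drop j) := by
      rw [hdrop, pvBspec, hrest, ← hpiece]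
    rw [ih, hbspec]
    by_cases hlt : j < lines.length
    · have hne : (lines.drop j).isEmpty = false := by
        simp [List.drop_eq_nil_iff]; omega
      rw [show pieces' = pieces ++ [piece] from if_pos (Or.inl hlt)]
      simp [hne]
    · have hnil : lines.drop j = [] := List.drop_eq_nil_of_le (by omega)
      rw [show pieces' = if j < lines.length ∨ piece.length > 2 then pieces ++ [piece] else pieces
        from rfl]
      simp [hnil, hlt, pvBspec]
      split <;> simp
  | case2 i pieces h =>
    rw [List.drop_eq_nil_of_le (by omega)]
    simp [pvBspec]

-- ===== VERDICT (by name: the statement is the Claim_ definition above) =====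
theorem parse_lines_to_pieces_spec : Claim_equal_parse_lines_to_pieces := by
  intro lines _
  show parse_lines_to_pieces lines = parse_lines_to_pieces_alt lines
  rw [pvA_eq_skip, pvSkip_bspec, parse_lines_to_pieces_alt, pvOuter_spec, pvScan_drop]
  simp
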